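-- pv_equiv track=rewrite | github.com/mbardea/broker | p1_common.py | parse_message_type
-- ===== SOURCE A (Python) =====
-- def parse_message_type(msg):
--     prev_empty = False
--     for part in msg:
--         if len(part) == 0:
--             prev_empty = True
--             continue
--         if prev_empty:
--             return part
--     return None
-- ===== SOURCE B (Python) =====
-- def parse_message_type(msg):
--     parts = list(msg)
--     if "" not in parts:
--         return None
--     tail = parts[parts.index("") + 1:]
--     nonempty = [p for p in tail if len(p) != 0]
--     return nonempty[0] if nonempty else None
-- ===== Notes on version B (the rewrite author's own statement) =====
-- stated objective: alternative
-- what changed: Replaces A's element-by-element scan with a stateful flag by whole-list operations: membership test for an empty part, list.index to locate it, a slice for the tail, and a filtering comprehension whose first element is returned.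
import Mathlib
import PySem

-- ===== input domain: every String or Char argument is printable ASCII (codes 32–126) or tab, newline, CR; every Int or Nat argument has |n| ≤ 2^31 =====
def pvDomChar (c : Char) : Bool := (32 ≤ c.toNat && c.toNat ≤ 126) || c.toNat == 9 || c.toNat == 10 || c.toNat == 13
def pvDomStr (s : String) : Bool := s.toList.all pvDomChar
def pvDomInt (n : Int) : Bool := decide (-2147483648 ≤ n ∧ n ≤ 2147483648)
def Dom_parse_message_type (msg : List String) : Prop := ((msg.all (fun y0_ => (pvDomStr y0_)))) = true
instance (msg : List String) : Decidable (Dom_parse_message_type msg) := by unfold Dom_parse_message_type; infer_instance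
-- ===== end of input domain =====

-- B replaces A's flagged scan with whole-list operations (membership, index, slice, filter); same value everywhere.

-- ===== PORT A =====
-- A's single loop with the prev_empty flag, as structural recursion carrying the flag.
def pmtAuxA (prev_empty : Bool) : List String → Option String
  | [] => none
  | part :: rest =>
    if part.length = 0 then pmtAuxA true rest
    else if prev_empty then some part
    else pmtAuxA prev_empty rest

def parse_message_type (msg : List String) : Option String := pmtAuxA false msg

-- ===== PORT B =====
def parse_message_type_alt (msg : List String) : Option String :=
  let parts := msg
  if "" ∉ parts then none
  else
    match PySem.List.index? parts "" with
    | none => none  -- unreachable: guarded by the membership test (Python .index would raise)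
    | some i =>
      let tail := PySem.List.slice parts (some ((i : Int) + 1)) none
      let nonempty := tail.filter (fun p => p.length ≠ 0)
      match nonempty with
      | [] => none
      | p :: _ => some p

-- ===== PRECONDITION & SPEC =====
def Spec_parse_message_type (msg : List String) (out : Option String) : Prop := out = parse_message_type_alt msg
instance (msg : List String) (out : Option String) : Decidable (Spec_parse_message_type msg out) := by unfold Spec_parse_message_type; infer_instance

-- ===== CLAIM (what is proved, stated in full; the proofs are below) =====
def Claim_equal_parse_message_type : Prop := ∀ (msg : List String), Dom_parse_message_type msg → Spec_parse_message_type msg (parse_message_type msg)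

-- ===== LEMMAS AND PROOFS =====
theorem str_len_zero (s : String) : s.length = 0 ↔ s = "" := by
  constructor
  · intro h; exact String.ext (by simpa [String.length] using List.length_eq_zero_iff.mp h)
  · intro h; simp [h]

theorem pmtAuxA_true (l : List String) :
    pmtAuxA true l = (match l.filter (fun p => p.length ≠ 0) with | [] => none | p :: _ => some p) := by
  induction l with
  | nil => rfl
  | cons part rest ih =>
    simp only [pmtAuxA, List.filter]
    by_cases h : part.length = 0 <;> simp [h, ih]

theorem slice_from_succ (xs : List String) (j : Nat) :
    PySem.List.slice xs (some ((j : Int) + 1)) = xs.drop (j + 1) := by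
  have h : ((j : Int) + 1) = (((j + 1 : Nat)) : Int) := by push_cast; ring
  rw [h, PySem.List.slice_from_natCast]

theorem pmtAuxA_false (l : List String) : pmtAuxA false l = parse_message_type_alt l := by
  induction l with
  | nil => rfl
  | cons part rest ih =>
    by_cases h : part.length = 0
    · have hpe : part = "" := (str_len_zero part).mp h
      subst hpe
      simp only [pmtAuxA, if_pos h, parse_message_type_alt]
      rw [pmtAuxA_true, if_neg (by simp : ¬ ("" ∉ ("" :: rest))), PySem.List.index?_cons_self]
      simp only []
      rw [show PySem.List.slice ("" :: rest) (some ((0:Nat) + 1 : Int)) = rest from by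
            rw [PySem.List.slice_from _ (by norm_num)]; norm_num]
    · have hne : part ≠ "" := fun hc => h (by simp [hc])
      simp only [pmtAuxA, if_neg h, if_neg (by simp : ¬ false = true)]
      rw [ih]
      by_cases hm : "" ∈ rest
      · have hm1 : ¬ ("" ∉ rest) := by simp [hm]
        have hm2 : ¬ ("" ∉ part :: rest) := by simp [List.mem_cons_of_mem _ hm]
        simp only [parse_message_type_alt]
        rw [if_neg hm1, if_neg hm2, PySem.List.index?_cons_of_ne rest hne]
        obtain ⟨j, hj⟩ := Option.isSome_iff_exists.mp ((PySem.List.index?_isSome_iff rest "").mpr hm)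
        rw [hj]
        simp only [Option.map_some]
        rw [slice_from_succ rest j]
        have h2 : PySem.List.slice (part :: rest) (some (((j + 1 : Nat) : Int) + 1)) = rest.drop (j + 1) := by
          rw [slice_from_succ (part :: rest) (j + 1)]
          rfl
        rw [h2]
      · have hm' : "" ∉ part :: rest := by
          intro hc; rcases List.mem_cons.mp hc with hc | hc
          · exact hne hc.symm
          · exact hm hc
        simp only [parse_message_type_alt]
        rw [if_pos hm', if_pos hm]

-- ===== VERDICT (by name: the statement is the Claim_ definition above) =====
theorem parse_message_type_spec : Claim_equal_parse_message_type := by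
  intro msg _
  unfold Spec_parse_message_type parse_message_type
  exact pmtAuxA_false msg
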